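-- pv_equiv track=rewrite | github.com/Jakkaps/event-app-backend | event-app/scraper/EventCrawler/items.py | __check_against_keywords
-- ===== SOURCE A (Python) =====
-- def __check_against_keywords(keywords, str, strict=False, allow_many=False):
--     """
--     Takes a list of words and returns the type with a matching keyword.
--     If the boolean strict is true, the search will require an excact match. If allow_many is true, then a comma seperated string of all matches is returend
--     """
--
--     # If nothing is passed, theres no need to do anything
--     if str == None:
--         return None
--
--     # Need to track how well it matches any given type
--     scores = {}
--     for type in keywords:
--         scores[type] = 0
--
--     # Go through a set of the words and the keywords to see if any match
--     words = [x.lower() for x in str.split()]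
--     for type in keywords:
--         for word in words:
--             for keyword in keywords.get(type):
--                 word = word.replace(',', '')
--                 if strict:
--                     if keyword == word:
--                         scores[type] = scores[type] + 1
--                 else:
--                     if keyword == word:
--                         scores[type] = scores[type] + 10
--                     elif keyword in word:
--                         scores[type] = scores[type] + 1
--
--
--     if allow_many:
--         # Return all keys that had some sort of match
--         hosts = ''
--         for item in scores.items():
--             if item[1] > 0:
--                 hosts += item[0] + ','
--         return hosts[:-1] # Take away last comma
--
--     else:
--         # Return the type with the largest score, but only if one of them != 0
--         v=list(scores.values())
--         k=list(scores.keys())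
--         best_match = k[v.index(max(v))]
--         return best_match if scores[best_match] != 0 else None
-- ===== SOURCE B (Python) =====
-- def __check_against_keywords(keywords, str, strict=False, allow_many=False):
--     if str is None:
--         return None
--
--     # Per-type multiset of its keyword list, built once.
--     def counter(kws):
--         c = {}
--         for kw in kws:
--             c[kw] = c.get(kw, 0) + 1
--         return c
--
--     counters = [(t, counter(kws)) for t, kws in keywords.items()]
--     exact = 1 if strict else 10
--
--     # Each word is normalised once; in non-strict mode the set of its distinct
--     # proper substrings is precomputed, so scoring a type is pure hash lookups
--     # (no scan over the keyword list): every keyword matching the word exactly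
--     # scores `exact`, every keyword occurring as a proper substring scores 1 —
--     # `kw in w` is exactly `kw ∈ substrings(w)`.
--     wordinfo = []
--     for raw in str.split():
--         w = raw.lower().replace(',', '')
--         if strict:
--             subs = set()
--         else:
--             subs = {w[i:j] for i in range(len(w) + 1) for j in range(i, len(w) + 1)}
--             subs.discard(w)
--         wordinfo.append((w, subs))
--
--     def score(c):
--         total = 0
--         for w, subs in wordinfo:
--             total += exact * c.get(w, 0)
--             for sub in subs:
--                 total += c.get(sub, 0)
--         return total
--
--     scored = [(t, score(c)) for t, c in counters]
--
--     if allow_many: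
--         return ','.join(t for t, s in scored if s > 0)
--
--     best_t, best_s = max(scored, key=lambda p: p[1])
--     return best_t if best_s != 0 else None
-- ===== Notes on version B (the rewrite author's own statement) =====
-- stated objective: alternative
-- what changed: B inverts the matching: it builds a hash Counter of each type's keyword list once and precomputes, for every normalised word, the set of its distinct proper substrings, so a type is scored purely by dictionary lookups of the word (exact hit, weight 10 or 1) and of each substring (weight 1) -- 'kw in word' is exactly 'kw is a member of the word's substring set' -- instead of A's scan of every keyword with == and 'in' per (type, word, keyword) triple; the answer is then ','.join over positive scores or max with a key.
import Mathlib
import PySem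

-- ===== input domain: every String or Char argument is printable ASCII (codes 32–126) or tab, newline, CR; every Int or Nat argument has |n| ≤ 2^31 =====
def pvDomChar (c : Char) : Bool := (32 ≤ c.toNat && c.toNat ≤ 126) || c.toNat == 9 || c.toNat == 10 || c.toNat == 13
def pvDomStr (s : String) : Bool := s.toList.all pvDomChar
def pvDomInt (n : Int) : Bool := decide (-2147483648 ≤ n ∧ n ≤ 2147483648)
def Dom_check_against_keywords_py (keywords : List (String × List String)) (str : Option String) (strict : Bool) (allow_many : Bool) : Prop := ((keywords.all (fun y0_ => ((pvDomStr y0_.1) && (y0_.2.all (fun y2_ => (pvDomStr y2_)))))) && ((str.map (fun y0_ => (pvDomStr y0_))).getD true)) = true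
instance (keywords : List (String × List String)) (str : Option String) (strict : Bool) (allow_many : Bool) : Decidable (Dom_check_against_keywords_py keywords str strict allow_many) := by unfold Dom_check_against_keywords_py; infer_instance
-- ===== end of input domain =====

-- B inverts the matching: a per-type keyword Counter built once plus, per normalised
-- word, the set of its distinct proper substrings, so a type is scored by hash lookups
-- (no scan over the keyword list); objective: alternative algorithm, same results.
-- `keywords` reaches the Python function as a dict, so both ports first collapse the
-- association list with PySem.Dict.ofList (duplicate keys: last value wins, first position).

-- ===== PORT A =====
def check_against_keywords_py (keywords : List (String × List String)) (str : Option String) (strict : Bool) (allow_many : Bool) : Option String :=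
  match str with
  | none => none
  | some s =>
    let kw : PySem.Dict String (List String) := PySem.Dict.ofList keywords
    -- scores = {}; for type in keywords: scores[type] = 0
    let scores0 : PySem.Dict String Int :=
      kw.keys.foldl (fun d t => d.insert t 0) PySem.Dict.empty
    -- words = [x.lower() for x in str.split()]
    let words : List String := (PySem.Str.split₀ s).map (fun x => PySem.Str.lower x)
    -- triple loop, mutating `scores` and rebinding `word`
    let scores : PySem.Dict String Int :=
      kw.keys.foldl (fun d t =>
        words.foldl (fun d word =>
          ((kw.getD t []).foldl (fun (st : PySem.Dict String Int × String) keyword =>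
            let word := PySem.Str.replace st.2 "," ""
            if strict then
              if keyword == word then (st.1.modify t 0 (· + 1), word) else (st.1, word)
            else
              if keyword == word then (st.1.modify t 0 (· + 10), word)
              else if PySem.Str.isIn keyword word then (st.1.modify t 0 (· + 1), word)
              else (st.1, word)) (d, word)).1) d) scores0
    if allow_many then
      let hosts : String :=
        scores.items.foldl (fun h it => if it.2 > 0 then h ++ it.1 ++ "," else h) ""
      some (PySem.Str.slice hosts none (some (-1)))
    else
      match PySem.List.max? scores.values (fun x => x) with
      | none => none        -- max([]) raises ValueError in Python: outside Pre_
      | some m =>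
        match PySem.List.index? scores.values m with
        | none => none      -- unreachable: m ∈ values
        | some i =>
          match scores.keys[i]? with
          | none => none    -- unreachable: i < keys.length
          | some best => if scores.getD best 0 != 0 then some best else none

-- ===== PORT B =====
-- counter(kws): c[kw] = c.get(kw, 0) + 1 over the list
def cakCounter (ks : List String) : PySem.Dict String Int :=
  ks.foldl (fun c k => c.insert k (c.getD k 0 + 1)) PySem.Dict.empty

-- {w[i:j] for i in range(len(w)+1) for j in range(i, len(w)+1)} with w discarded
def cakSubs (w : String) : PySem.Set String :=
  PySem.Set.discard (PySem.Set.ofList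
    ((PySem.List.pyRange 0 (PySem.Str.len w + 1) 1).flatMap (fun i =>
      (PySem.List.pyRange i (PySem.Str.len w + 1) 1).map (fun j =>
        PySem.Str.slice w (some i) (some j))))) w

-- score(c): hash lookups of each word and its substrings (sum is order-independent,
-- so folding the substring Set in its list order is exact for Python's set iteration)
def cakScore (exact : Int) (wi : List (String × List String)) (c : PySem.Dict String Int) : Int :=
  wi.foldl (fun total p =>
    p.2.foldl (fun t sub => t + c.getD sub 0) (total + exact * c.getD p.1 0)) 0

def check_against_keywords_py_alt (keywords : List (String × List String)) (str : Option String) (strict : Bool) (allow_many : Bool) : Option String :=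
  match str with
  | none => none
  | some s =>
    let kw : PySem.Dict String (List String) := PySem.Dict.ofList keywords
    let counters : List (String × PySem.Dict String Int) :=
      kw.items.map (fun p => (p.1, cakCounter p.2))
    let exact : Int := if strict then 1 else 10
    -- wordinfo: (normalised word, its distinct proper substrings; empty when strict)
    let wordinfo : List (String × List String) :=
      (PySem.Str.split₀ s).map (fun raw =>
        let w := PySem.Str.replace (PySem.Str.lower raw) "," ""
        (w, if strict then PySem.Set.empty else cakSubs w))
    let scored : List (String × Int) :=
      counters.map (fun p => (p.1, cakScore exact wordinfo p.2))
    if allow_many then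
      some (PySem.Str.join "," ((scored.filter (fun p => p.2 > 0)).map Prod.fst))
    else
      match PySem.List.max? scored (fun p => p.2) with
      | none => none        -- max([]) raises ValueError in Python: outside Pre_
      | some best => if best.2 != 0 then some best.1 else none

-- ===== PRECONDITION & SPEC =====
-- Pre_ excludes only the inputs where A raises: with a non-None string, allow_many=False
-- and an empty keywords dict, A's max(v) on the empty values list raises ValueError
-- (B's max(scored, ...) raises there too).
def Pre_check_against_keywords_py (keywords : List (String × List String)) (str : Option String) (strict : Bool) (allow_many : Bool) : Prop :=
  str = none ∨ allow_many = true ∨ keywords ≠ []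
instance (keywords : List (String × List String)) (str : Option String) (strict : Bool) (allow_many : Bool) : Decidable (Pre_check_against_keywords_py keywords str strict allow_many) := by unfold Pre_check_against_keywords_py; infer_instance

def pvWitness_check_against_keywords_py : (List (String × List String)) × Option String × Bool × Bool :=
  ([("music", ["dj", "concert"]), ("sports", ["match"])], some "DJ night, great concert", false, false)

def Spec_check_against_keywords_py (keywords : List (String × List String)) (str : Option String) (strict : Bool) (allow_many : Bool) (out : Option String) : Prop := out = check_against_keywords_py_alt keywords str strict allow_many
instance (keywords : List (String × List String)) (str : Option String) (strict : Bool) (allow_many : Bool) (out : Option String) : Decidable (Spec_check_against_keywords_py keywords str strict allow_many out) := by unfold Spec_check_against_keywords_py; infer_instance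

-- ===== CLAIM (what is proved, stated in full; the proofs are below) =====
def Claim_equal_check_against_keywords_py : Prop := ∀ (keywords : List (String × List String)) (str : Option String) (strict : Bool) (allow_many : Bool), Dom_check_against_keywords_py keywords str strict allow_many → Pre_check_against_keywords_py keywords str strict allow_many → Spec_check_against_keywords_py keywords str strict allow_many (check_against_keywords_py keywords str strict allow_many)

-- ===== LEMMAS AND PROOFS =====

def pvCw (w : String) : String := PySem.Str.replace w "," ""

theorem pv_go_comma (fuel : Nat) : ∀ (l acc : List Char), l.length ≤ fuel →
    PySem.Chars.replace.go [','] [] fuel l acc = acc.reverse ++ l.filter (fun c => c != ',') := by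
  induction fuel with
  | zero => intro l acc h; simp at h; simp [h, PySem.Chars.replace.go]
  | succ n ih =>
    intro l acc h
    cases l with
    | nil => simp [PySem.Chars.replace.go]
    | cons c t =>
      have hstep : PySem.Chars.replace.go [','] [] (n+1) (c :: t) acc =
          (if List.isPrefixOf [','] (c :: t) = true
            then PySem.Chars.replace.go [','] [] n (List.drop [','].length (c :: t)) (List.reverse [] ++ acc)
            else PySem.Chars.replace.go [','] [] n t (c :: acc)) := rfl
      have hpre : List.isPrefixOf [','] (c :: t) = (',' == c) := by
        show ((',' == c) && List.isPrefixOf [] t) = (',' == c)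
        cases t <;> simp
      rw [hstep, hpre]
      by_cases hc : c = ','
      · subst hc
        rw [if_pos (by decide)]
        have hd : List.drop [','].length (',' :: t) = t := rfl
        rw [hd, ih t _ (by simpa using h)]
        simp
      · have hcc : (',' == c) = false := beq_eq_false_iff_ne.mpr (fun h' => hc h'.symm)
        rw [hcc, if_neg (by simp)]
        rw [ih t (c :: acc) (by simpa using h)]
        have h2 : (c != ',') = true := by simpa using hc
        simp [h2]

theorem pv_replace_comma (s : String) : (pvCw s).toList = s.toList.filter (fun c => c != ',') := by
  simp only [pvCw, PySem.Str.replace, PySem.Chars.replace]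
  have e1 : (",".toList) = [','] := rfl
  have e2 : ("".toList) = ([] : List Char) := rfl
  rw [e1, e2, if_neg (by simp), pv_go_comma _ _ _ le_rfl]
  simp

theorem pv_cw_idem (w : String) : pvCw (pvCw w) = pvCw w := by
  rw [← String.toList_inj, pv_replace_comma, pv_replace_comma w, List.filter_filter]
  simp

theorem pv_modify_modify (d : PySem.Dict String Int) (t : String) (f g : Int → Int) :
    (d.modify t 0 f).modify t 0 g = d.modify t 0 (fun v => g (f v)) := by
  simp [PySem.Dict.modify, PySem.Dict.getD_insert_self, PySem.Dict.insert_insert_self]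

theorem pv_modify_keys (d : PySem.Dict String Int) (t : String) (f : Int → Int)
    (ht : t ∈ d.keys) : (d.modify t 0 f).keys = d.keys := by
  rw [PySem.Dict.keys_modify]
  exact PySem.Dict.keys_insert_of_contains _ _ ((PySem.Dict.contains_iff_mem_keys _ _).mpr ht)

theorem pv_insert_getD (d : PySem.Dict String Int) (t : String) (hnd : d.keys.Nodup)
    (ht : t ∈ d.keys) : d.insert t (d.getD t 0) = d := by
  apply PySem.Dict.ext
  rw [PySem.Dict.items_insert_of_contains _ _ ((PySem.Dict.contains_iff_mem_keys _ _).mpr ht)]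
  conv_rhs => rw [← List.map_id d.items]
  apply List.map_congr_left
  intro p hp
  by_cases hpt : p.1 = t
  · have h2 : d.getD p.1 0 = p.2 := PySem.Dict.getD_of_mem_items _ (by simpa using hp) hnd 0
    have : (p.1 == t) = true := by simp [hpt]
    simp only [this, if_pos]
    rw [← hpt, h2]
    rfl
  · have : (p.1 == t) = false := by simp [hpt]
    simp [this]

theorem pv_modify_zero (d : PySem.Dict String Int) (t : String) (hnd : d.keys.Nodup)
    (ht : t ∈ d.keys) : d.modify t 0 (fun v => v + 0) = d := by
  show d.insert t (d.getD t 0 + 0) = d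
  rw [Int.add_zero]
  exact pv_insert_getD d t hnd ht

def pvWsc (strict : Bool) (k w : String) : Int :=
  if k == w then (if strict then 1 else 10) else if !strict && PySem.Str.isIn k w then 1 else 0

theorem pv_modify_id2 (d : PySem.Dict String Int) (t : String) (hnd : d.keys.Nodup)
    (ht : t ∈ d.keys) : d.modify t 0 (fun v => v) = d := pv_insert_getD d t hnd ht

theorem pv_inner (strict : Bool) (t : String) (ks : List String) :
    ∀ (d : PySem.Dict String Int) (w : String), d.keys.Nodup → t ∈ d.keys →
      (ks.foldl (fun (st : PySem.Dict String Int × String) keyword =>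
        let word := PySem.Str.replace st.2 "," ""
        if strict then
          if keyword == word then (st.1.modify t 0 (· + 1), word) else (st.1, word)
        else
          if keyword == word then (st.1.modify t 0 (· + 10), word)
          else if PySem.Str.isIn keyword word then (st.1.modify t 0 (· + 1), word)
          else (st.1, word)) (d, w)).1
      = d.modify t 0 (· + (ks.map (fun k => pvWsc strict k (pvCw w))).sum) := by
  induction ks with
  | nil =>
    intro d w hnd ht
    simp only [List.foldl_nil, List.map_nil, List.sum_nil]
    exact (pv_modify_zero d t hnd ht).symm
  | cons k ks ih =>
    intro d w hnd ht
    rw [List.foldl_cons]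
    have key : (let word := PySem.Str.replace w "," ""
        if strict then
          if k == word then ((d.modify t 0 (· + 1) : PySem.Dict String Int), word) else (d, word)
        else
          if k == word then (d.modify t 0 (· + 10), word)
          else if PySem.Str.isIn k word then (d.modify t 0 (· + 1), word)
          else (d, word))
        = (d.modify t 0 (· + pvWsc strict k (pvCw w)), pvCw w) := by
      show (if strict then _ else _) = _
      by_cases h1 : (k == PySem.Str.replace w "," "") = true
      · cases strict <;> simp only [if_true, if_false, Bool.false_eq_true, h1, if_pos] <;>
          simp only [pvWsc, pvCw, h1, if_pos, Bool.not_true, Bool.not_false] <;> norm_num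
      · have h1' : (k == pvCw w) = false := by simpa [pvCw] using h1
        by_cases h2 : PySem.Str.isIn k (PySem.Str.replace w "," "") = true
        · cases strict <;>
            simp only [if_true, if_false, Bool.false_eq_true, h1, h2, Bool.not_true,
              Bool.not_false, pvWsc, pvCw, h1', Bool.false_and, Bool.true_and] <;>
            simp <;> exact (pv_modify_id2 d t hnd ht).symm
        · have h2' : PySem.Str.isIn k (pvCw w) = false := by simpa [pvCw] using h2
          cases strict <;>
            simp only [if_true, if_false, Bool.false_eq_true, h1, h2, Bool.not_true,
              Bool.not_false, pvWsc, pvCw, h1', h2', Bool.false_and, Bool.true_and] <;>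
            simp <;> exact (pv_modify_id2 d t hnd ht).symm
    rw [key]
    have hk' : (d.modify t 0 (· + pvWsc strict k (pvCw w))).keys = d.keys :=
      pv_modify_keys d t _ ht
    rw [ih _ (pvCw w) (hk' ▸ hnd) (hk' ▸ ht)]
    rw [pv_modify_modify, pv_cw_idem]
    congr 1
    funext v
    rw [List.map_cons, List.sum_cons]
    ring

def pvSc (strict : Bool) (ws ks : List String) : Int :=
  (ws.map (fun w => (ks.map (fun k => pvWsc strict k (pvCw w))).sum)).sum

theorem pv_middle (strict : Bool) (t : String) (ks : List String) (ws : List String) :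
    ∀ (d : PySem.Dict String Int), d.keys.Nodup → t ∈ d.keys →
      ws.foldl (fun d word =>
        ((ks.foldl (fun (st : PySem.Dict String Int × String) keyword =>
          let word := PySem.Str.replace st.2 "," ""
          if strict then
            if keyword == word then (st.1.modify t 0 (· + 1), word) else (st.1, word)
          else
            if keyword == word then (st.1.modify t 0 (· + 10), word)
            else if PySem.Str.isIn keyword word then (st.1.modify t 0 (· + 1), word)
            else (st.1, word)) (d, word)).1)) d
      = d.modify t 0 (· + pvSc strict ws ks) := by
  induction ws with
  | nil =>
    intro d hnd ht
    simp only [List.foldl_nil, pvSc, List.map_nil, List.sum_nil]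
    exact (pv_modify_zero d t hnd ht).symm
  | cons w ws ih =>
    intro d hnd ht
    rw [List.foldl_cons, pv_inner strict t ks d w hnd ht]
    have hk' : (d.modify t 0 (· + (ks.map (fun k => pvWsc strict k (pvCw w))).sum)).keys = d.keys :=
      pv_modify_keys d t _ ht
    rw [ih _ (hk' ▸ hnd) (hk' ▸ ht), pv_modify_modify]
    congr 1
    funext v
    simp only [pvSc, List.map_cons, List.sum_cons]
    ring

theorem pv_outer (strict : Bool) (ws : List String) (kw : PySem.Dict String (List String)) :
    ∀ (ts : List String) (d : PySem.Dict String Int), d.keys.Nodup → (∀ u ∈ ts, u ∈ d.keys) →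
      ((ts.foldl (fun d t =>
        ws.foldl (fun d word =>
          (((kw.getD t []).foldl (fun (st : PySem.Dict String Int × String) keyword =>
            let word := PySem.Str.replace st.2 "," ""
            if strict then
              if keyword == word then (st.1.modify t 0 (· + 1), word) else (st.1, word)
            else
              if keyword == word then (st.1.modify t 0 (· + 10), word)
              else if PySem.Str.isIn keyword word then (st.1.modify t 0 (· + 1), word)
              else (st.1, word)) (d, word)).1)) d) d).keys = d.keys ∧
      ∀ x, (ts.foldl (fun d t =>
        ws.foldl (fun d word =>
          (((kw.getD t []).foldl (fun (st : PySem.Dict String Int × String) keyword =>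
            let word := PySem.Str.replace st.2 "," ""
            if strict then
              if keyword == word then (st.1.modify t 0 (· + 1), word) else (st.1, word)
            else
              if keyword == word then (st.1.modify t 0 (· + 10), word)
              else if PySem.Str.isIn keyword word then (st.1.modify t 0 (· + 1), word)
              else (st.1, word)) (d, word)).1)) d) d).getD x 0
        = d.getD x 0 + ((ts.filter (fun u => u == x)).map (fun u => pvSc strict ws (kw.getD u []))).sum) := by
  intro ts
  induction ts with
  | nil => intro d hnd hts; exact ⟨rfl, fun x => by simp⟩
  | cons t ts ih =>
    intro d hnd hts
    have ht : t ∈ d.keys := hts t (List.mem_cons_self ..)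
    have hstep := pv_middle strict t (kw.getD t []) ws d hnd ht
    constructor
    · rw [List.foldl_cons, hstep]
      have hk' := pv_modify_keys d t (· + pvSc strict ws (kw.getD t [])) ht
      exact (ih _ (hk' ▸ hnd) (fun u hu => hk' ▸ hts u (List.mem_cons_of_mem _ hu))).1.trans hk'
    · intro x
      rw [List.foldl_cons, hstep]
      have hk' := pv_modify_keys d t (· + pvSc strict ws (kw.getD t [])) ht
      rw [(ih _ (hk' ▸ hnd) (fun u hu => hk' ▸ hts u (List.mem_cons_of_mem _ hu))).2 x]
      rw [PySem.Dict.getD_modify]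
      by_cases hx : x = t
      · subst hx
        have : (x == x) = true := by simp
        simp only [List.filter_cons, this, if_pos, List.map_cons, List.sum_cons, if_true]
        ring
      · have h1 : (t == x) = false := by simp; exact fun h => hx h.symm
        rw [if_neg hx]
        simp only [List.filter_cons, h1, Bool.false_eq_true, if_neg, not_false_iff]

def pvRun (x : String × Int) (t : List (String × Int)) : String × Int :=
  t.foldl (fun m y => if m.2 < y.2 then y else m) x

theorem pvRun_cons (x y : String × Int) (t : List (String × Int)) :
    pvRun x (y :: t) = pvRun (if x.2 < y.2 then y else x) t := rfl

theorem pv_max?_cons (x : String × Int) (t : List (String × Int)) :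
    PySem.List.max? (x :: t) (fun p => p.2) = some (pvRun x t) := by
  show List.foldl _ (some x) t = _
  induction t generalizing x with
  | nil => rfl
  | cons y t ih =>
    rw [List.foldl_cons, pvRun_cons]
    by_cases h : x.2 < y.2 <;> simp only [h, if_pos, if_neg, if_true, if_false] <;> exact ih _

theorem pv_max?_values (x : String × Int) (t : List (String × Int)) :
    PySem.List.max? ((x :: t).map Prod.snd) (fun v => v) = some (pvRun x t).2 := by
  show List.foldl _ (some x.2) (t.map Prod.snd) = _
  induction t generalizing x with
  | nil => rfl
  | cons y t ih =>
    rw [List.map_cons, List.foldl_cons, pvRun_cons]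
    by_cases h : x.2 < y.2 <;> simp only [h, if_pos, if_neg, if_true, if_false] <;> exact ih _

theorem pv_run_mem (x : String × Int) (t : List (String × Int)) : pvRun x t ∈ x :: t := by
  induction t generalizing x with
  | nil => exact List.mem_singleton.mpr rfl
  | cons y t ih =>
    rw [pvRun_cons]
    by_cases h : x.2 < y.2 <;> simp only [h, if_pos, if_neg, if_true, if_false]
    · exact List.mem_cons_of_mem _ (ih y)
    · rcases List.mem_cons.mp (ih x) with h1 | h1
      · rw [h1]; exact List.mem_cons_self ..
      · exact List.mem_cons_of_mem _ (List.mem_cons_of_mem _ h1)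

theorem pv_run_eq_or_lt (x : String × Int) (t : List (String × Int)) :
    pvRun x t = x ∨ x.2 < (pvRun x t).2 := by
  induction t generalizing x with
  | nil => exact Or.inl rfl
  | cons y t ih =>
    rw [pvRun_cons]
    by_cases h : x.2 < y.2
    · simp only [h, if_pos]
      rcases ih y with h1 | h1
      · exact Or.inr (by rw [h1]; exact h)
      · exact Or.inr (h.trans h1)
    · simp only [h, if_neg, if_false]
      exact ih x

theorem pv_first : ∀ (t : List (String × Int)) (x : String × Int),
    ∃ j, List.idxOf? (pvRun x t).2 ((x :: t).map Prod.snd) = some j ∧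
      (x :: t)[j]? = some (pvRun x t) := by
  intro t
  induction t with
  | nil =>
    intro x
    exact ⟨0, by simp [pvRun, List.idxOf?_cons], rfl⟩
  | cons y t ih =>
    intro x
    rw [pvRun_cons]
    by_cases h : x.2 < y.2
    · simp only [h, if_pos]
      obtain ⟨j, hj1, hj2⟩ := ih y
      have hlt : x.2 < (pvRun y t).2 := by
        rcases pv_run_eq_or_lt y t with h1 | h1
        · rw [h1]; exact h
        · exact h.trans h1
      refine ⟨j + 1, ?_, by simpa using hj2⟩
      rw [List.map_cons, List.idxOf?_cons]
      have : (x.2 == (pvRun y t).2) = false := by simp; omega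
      simp only [this, Bool.false_eq_true, if_neg, hj1, not_false_iff]
      rfl
    · simp only [h, if_neg, if_false]
      obtain ⟨j, hj1, hj2⟩ := ih x
      rcases pv_run_eq_or_lt x t with h1 | h1
      · rw [h1]
        refine ⟨0, ?_, rfl⟩
        rw [List.map_cons, List.idxOf?_cons]
        simp
      · -- x.2 < (pvRun x t).2, and y.2 ≤ x.2
        have hy : ¬ y.2 = (pvRun x t).2 := by omega
        have hx : ¬ x.2 = (pvRun x t).2 := by omega
        rw [List.map_cons, List.idxOf?_cons] at hj1
        have hxb : (x.2 == (pvRun x t).2) = false := by simp [hx]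
        simp only [hxb, Bool.false_eq_true, if_neg, not_false_iff] at hj1
        obtain ⟨j', hj'1, hj'2⟩ := Option.map_eq_some_iff.mp hj1
        refine ⟨j' + 2, ?_, ?_⟩
        · have hyb : (y.2 == (pvRun x t).2) = false := by simp [hy]
          rw [List.map_cons, List.idxOf?_cons]
          simp only [hxb, Bool.false_eq_true, if_neg, not_false_iff]
          rw [List.map_cons, List.idxOf?_cons]
          simp only [hyb, Bool.false_eq_true, if_neg, not_false_iff, hj'1]
          rfl
        · subst hj'2
          simp only [List.getElem?_cons_succ] at hj2 ⊢
          exact hj2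

theorem pv_hosts (l : List (String × Int)) : ∀ (h : String),
    (l.foldl (fun h it => if it.2 > 0 then h ++ it.1 ++ "," else h) h).toList
    = h.toList ++ ((l.filter (fun p => decide (p.2 > 0))).map (fun p => p.1.toList ++ [','])).flatten := by
  induction l with
  | nil => intro h; simp
  | cons p l ih =>
    intro h
    rw [List.foldl_cons, List.filter_cons]
    by_cases hp : p.2 > 0
    · simp only [hp, decide_true, if_pos, if_true]
      rw [ih]
      simp [String.toList_append]
    · simp only [hp, decide_false, Bool.false_eq_true, if_neg, not_false_iff]
      exact ih h

theorem pv_join_names : ∀ (names : List String),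
    ((names.map (fun n => n.toList ++ [','])).flatten).dropLast
    = PySem.Chars.join [','] (names.map String.toList) := by
  intro names
  induction names with
  | nil => simp [PySem.Chars.join_nil]
  | cons n rest ih =>
    cases rest with
    | nil => simp [PySem.Chars.join_singleton]
    | cons m rest' =>
      rw [List.map_cons, List.flatten_cons, List.map_cons, List.map_cons]
      conv_rhs => rw [List.map_cons]
      rw [PySem.Chars.join_cons_cons]
      have hne : ((List.map (fun n => n.toList ++ [',']) (m :: rest')).flatten) ≠ [] := by
        simp
      rw [List.append_assoc, List.dropLast_append_of_ne_nil (by simpa using hne)]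
      simp only [List.map_cons, List.flatten_cons] at ih
      rw [List.flatten_cons, List.dropLast_append_of_ne_nil (by simp), ih]
      simp

theorem pv_scores0_items (kw : PySem.Dict String (List String)) (hnd : kw.keys.Nodup) :
    (kw.keys.foldl (fun d t => d.insert t (0:Int)) PySem.Dict.empty).items
    = kw.keys.map (fun t => (t, (0:Int))) := by
  have h := PySem.Dict.items_foldl_insert_fresh kw.keys (fun t => t) (fun _ => (0:Int))
    PySem.Dict.empty (fun a _ => by simp) (by simpa using hnd)
  simpa using h

theorem pv_allow_eq (l : List (String × Int)) :
    PySem.Str.slice (l.foldl (fun h it => if it.2 > 0 then h ++ it.1 ++ "," else h) "") none (some (-1))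
    = PySem.Str.join "," ((l.filter (fun p => p.2 > 0)).map Prod.fst) := by
  rw [← String.toList_inj, PySem.Str.slice_to_neg_one, pv_hosts l ""]
  show (((l.filter (fun p => decide (p.2 > 0))).map (fun p => p.1.toList ++ [','])).flatten).dropLast
    = _
  have h1 : (l.filter (fun p => decide (p.2 > 0))).map (fun p => p.1.toList ++ [','])
      = ((l.filter (fun p => decide (p.2 > 0))).map Prod.fst).map (fun n => n.toList ++ [',']) := by
    rw [List.map_map]; rfl
  rw [h1, pv_join_names]
  simp [PySem.Str.join]

theorem pv_best_eq (F : PySem.Dict String Int) (l : List (String × Int)) (hne : l ≠ [])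
    (hitems : F.items = l) (hnd : F.keys.Nodup) :
    (match PySem.List.max? F.values (fun x => x) with
     | none => none
     | some m =>
       match PySem.List.index? F.values m with
       | none => none
       | some i =>
         match F.keys[i]? with
         | none => none
         | some best => if F.getD best 0 != 0 then some best else none)
    = (match PySem.List.max? l (fun p => p.2) with
       | none => none
       | some best => if best.2 != 0 then some best.1 else none) := by
  obtain ⟨x, t, rfl⟩ := List.exists_cons_of_ne_nil hne
  have hv : F.values = (x :: t).map Prod.snd := by simp [PySem.Dict.values, hitems]
  have hk : F.keys = (x :: t).map Prod.fst := by simp [PySem.Dict.keys, hitems]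
  obtain ⟨j, hj1, hj2⟩ := pv_first t x
  rw [hv, hk, pv_max?_values, pv_max?_cons]
  have hjm : ((x :: t).map Prod.fst)[j]? = some (pvRun x t).1 := by
    rw [List.getElem?_map, hj2]; rfl
  have hb : ((pvRun x t).1, (pvRun x t).2) ∈ F.items := by
    rw [hitems]; simpa using pv_run_mem x t
  have hg : F.getD (pvRun x t).1 0 = (pvRun x t).2 :=
    PySem.Dict.getD_of_mem_items F hb hnd 0
  simp only [PySem.List.index?_eq_idxOf?, hj1, hjm, hg]

-- ===== B-side lemmas: counter, substring set, score =====

theorem cak_counter_getD (ks : List String) (v : String) :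
    (cakCounter ks).getD v 0 = (ks.count v : Int) := by
  rw [cakCounter, PySem.Dict.getD_foldl_insert_add_one]
  simp

theorem cak_slice_toList (w : String) (a? b? : Option Int) :
    (PySem.Str.slice w a? b?).toList = PySem.List.slice w.toList a? b? := by
  simp [PySem.Str.slice]

theorem cak_mem_subs (w s' : String) :
    s' ∈ cakSubs w ↔ (PySem.Str.isIn s' w = true ∧ s' ≠ w) := by
  rw [cakSubs, PySem.Set.mem_discard]
  rw [PySem.Set.mem_ofList, PySem.Str.isIn_iff_infix]
  apply and_congr_left'
  rw [List.mem_flatMap]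
  constructor
  · rintro ⟨i, hi, hmem⟩
    rw [List.mem_map] at hmem
    obtain ⟨j, hj, hsl⟩ := hmem
    rw [PySem.List.mem_pyRange_one] at hi hj
    have h0i : 0 ≤ i := hi.1
    have h0j : 0 ≤ j := le_trans h0i hj.1
    rw [← hsl, ← String.toList_inj] at *
    rw [cak_slice_toList, PySem.List.slice_toNat _ h0i h0j]
    exact ((w.toList.drop i.toNat).take_prefix _).isInfix.trans (w.toList.drop_suffix _).isInfix
  · rintro ⟨pre, suf, h⟩
    refine ⟨(pre.length : Int), ?_, ?_⟩
    · rw [PySem.List.mem_pyRange_one, PySem.Str.len_eq]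
      have : pre.length ≤ w.toList.length := by
        rw [← h]; simp
      constructor <;> omega
    · rw [List.mem_map]
      refine ⟨((pre.length + s'.toList.length : Nat) : Int), ?_, ?_⟩
      · rw [PySem.List.mem_pyRange_one, PySem.Str.len_eq]
        have : pre.length + s'.toList.length ≤ w.toList.length := by
          rw [← h]; simp
        constructor
        · exact_mod_cast Nat.le_add_right _ _
        · push_cast; omega
      · rw [← String.toList_inj, cak_slice_toList, PySem.List.slice_natCast, ← h]
        rw [List.append_assoc, List.drop_left, Nat.add_sub_cancel_left, List.take_left]

theorem cak_nodup_subs (w : String) : (cakSubs w).Nodup :=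
  PySem.Set.nodup_discard _ _ (PySem.Set.nodup_ofList _)

-- sum of keyword counts over a duplicate-free set = per-keyword membership indicators
theorem cak_sum_count (S : List String) (hS : S.Nodup) (ks : List String) :
    (S.map (fun s' => (ks.count s' : Int))).sum
      = (ks.map (fun k => if k ∈ S then (1:Int) else 0)).sum := by
  induction ks with
  | nil => simp
  | cons k ks ih =>
    simp only [List.map_cons, List.sum_cons]
    have hstep : (S.map (fun s' => ((k :: ks).count s' : Int))).sum
        = (S.map (fun s' => (ks.count s' : Int))).sum
          + (S.map (fun s' => if (s' == k) then (1:Int) else 0)).sum := by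
      rw [← PySem.List.sum_map_add_int]
      apply congrArg
      apply List.map_congr_left
      intro s' _
      rw [List.count_cons]
      by_cases h : k = s'
      · subst h; simp
      · have hb1 : (k == s') = false := by simp [h]
        have hb2 : (s' == k) = false := by simp; exact fun h' => h h'.symm
        simp [hb1, hb2]
    have hind : (S.map (fun s' => if (s' == k) then (1:Int) else 0)).sum
        = if k ∈ S then (1:Int) else 0 := by
      rw [PySem.List.sum_map_ite_one_zero (fun s' => s' == k) S]
      show ((S.count k : Nat) : Int) = _
      by_cases hk : k ∈ S
      · rw [List.count_eq_one_of_mem hS hk, if_pos hk]; rfl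
      · rw [List.count_eq_zero_of_not_mem hk, if_neg hk]; rfl
    rw [hstep, hind, ih]
    ring

def pvWsc' (strict : Bool) (u : String) (k : String) : Int := pvWsc strict k u

-- per normalised word: (exact hit) * count + substring-set hits = A's keyword scan
theorem cak_word (strict : Bool) (u : String) (ks : List String) :
    (if strict then (1:Int) else 10) * (ks.count u : Int)
      + ((if strict then ([] : List String) else cakSubs u).map (fun s' => (ks.count s' : Int))).sum
    = (ks.map (fun k => pvWsc strict k u)).sum := by
  have hcnt : ((ks.count u : Nat) : Int)
      = (ks.map (fun k => if (k == u) then (1:Int) else 0)).sum := by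
    rw [PySem.List.sum_map_ite_one_zero (fun k => k == u) ks]; rfl
  cases strict with
  | false =>
    simp only [if_false, Bool.false_eq_true]
    rw [cak_sum_count (cakSubs u) (cak_nodup_subs u) ks, hcnt,
      ← List.sum_map_mul_left, ← PySem.List.sum_map_add_int]
    apply congrArg
    apply List.map_congr_left
    intro k _
    simp only [cak_mem_subs]
    by_cases h1 : k = u
    · subst h1
      simp [pvWsc]
    · have h1' : (k == u) = false := by simp [h1]
      have hs : PySem.Str.isIn k u = PySem.Chars.isIn k.toList u.toList := rfl
      by_cases h2 : PySem.Chars.isIn k.toList u.toList = true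
      · simp [pvWsc, h1', h2, h1]
      · simp [pvWsc, h1', h2]
  | true =>
    simp only [if_true, List.map_nil, List.sum_nil, add_zero, one_mul]
    rw [hcnt]
    apply congrArg
    apply List.map_congr_left
    intro k _
    by_cases h1 : (k == u) = true <;> simp [pvWsc, h1]

theorem cak_score_eq (exact : Int) (wi : List (String × List String)) (c : PySem.Dict String Int) :
    cakScore exact wi c
      = (wi.map (fun p => exact * c.getD p.1 0 + (p.2.map (fun s' => c.getD s' 0)).sum)).sum := by
  rw [cakScore]
  have h1 : wi.foldl (fun total p =>
        p.2.foldl (fun t sub => t + c.getD sub 0) (total + exact * c.getD p.1 0)) 0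
      = wi.foldl (fun total p =>
        total + (exact * c.getD p.1 0 + (p.2.map (fun s' => c.getD s' 0)).sum)) 0 :=
    PySem.List.foldl_congr_mem wi
      (fun total p => p.2.foldl (fun t sub => t + c.getD sub 0) (total + exact * c.getD p.1 0))
      (fun total p => total + (exact * c.getD p.1 0 + (p.2.map (fun s' => c.getD s' 0)).sum))
      0 (fun acc p _ => by simp only [PySem.List.foldl_add]; ring)
  rw [h1, PySem.List.foldl_add]
  simp

-- per type: B's counter + substring-set score = A's triple-scan score
theorem cak_type (strict : Bool) (raws ks : List String) :
    cakScore (if strict then 1 else 10)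
      (raws.map (fun raw =>
        (PySem.Str.replace (PySem.Str.lower raw) "," "",
         if strict then PySem.Set.empty else cakSubs (PySem.Str.replace (PySem.Str.lower raw) "," ""))))
      (cakCounter ks)
    = pvSc strict (raws.map (fun x => PySem.Str.lower x)) ks := by
  rw [cak_score_eq, List.map_map]
  unfold pvSc
  rw [List.map_map]
  apply congrArg
  apply List.map_congr_left
  intro raw _
  show (if strict then (1:Int) else 10) * (cakCounter ks).getD (pvCw (PySem.Str.lower raw)) 0
      + ((if strict then PySem.Set.empty else cakSubs (pvCw (PySem.Str.lower raw))).map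
          (fun s' => (cakCounter ks).getD s' 0)).sum
    = (ks.map (fun k => pvWsc strict k (pvCw (PySem.Str.lower raw)))).sum
  have hmap : ∀ (S : List String), (S.map (fun s' => (cakCounter ks).getD s' 0))
      = (S.map (fun s' => (ks.count s' : Int))) := by
    intro S
    exact List.map_congr_left (fun s' _ => cak_counter_getD ks s')
  rw [cak_counter_getD, hmap]
  exact cak_word strict (pvCw (PySem.Str.lower raw)) ks

theorem pv_main (keywords : List (String × List String)) (str : Option String)
    (strict allow_many : Bool)
    (hpre : str = none ∨ allow_many = true ∨ keywords ≠ []) :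
    check_against_keywords_py keywords str strict allow_many
      = check_against_keywords_py_alt keywords str strict allow_many := by
  cases str with
  | none => rfl
  | some s =>
    simp only [check_against_keywords_py, check_against_keywords_py_alt]
    have hnd : (PySem.Dict.ofList keywords).keys.Nodup := PySem.Dict.nodup_keys_ofList keywords
    have h0 := pv_scores0_items (PySem.Dict.ofList keywords) hnd
    have hkeys0 : ((PySem.Dict.ofList keywords).keys.foldl (fun d t => d.insert t (0:Int)) PySem.Dict.empty).keys
        = (PySem.Dict.ofList keywords).keys := by
      show List.map (fun x => x.1) ((PySem.Dict.ofList keywords).keys.foldl (fun d t => d.insert t (0:Int)) PySem.Dict.empty).items = _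
      rw [h0, List.map_map]
      exact List.map_id _
    have hget0 : ∀ x, ((PySem.Dict.ofList keywords).keys.foldl (fun d t => d.insert t (0:Int)) PySem.Dict.empty).getD x 0 = 0 := by
      intro x
      by_cases hx : x ∈ (PySem.Dict.ofList keywords).keys
      · exact PySem.Dict.getD_of_mem_items _ (by rw [h0]; exact List.mem_map_of_mem hx) (hkeys0.symm ▸ hnd) 0
      · refine PySem.Dict.getD_of_not_contains _ _ ?_
        rw [← Bool.not_eq_true]
        intro hc
        exact hx (hkeys0 ▸ (PySem.Dict.contains_iff_mem_keys _ _).mp hc)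
    have houter := pv_outer strict ((PySem.Str.split₀ s).map (fun x => PySem.Str.lower x))
      (PySem.Dict.ofList keywords) (PySem.Dict.ofList keywords).keys
      ((PySem.Dict.ofList keywords).keys.foldl (fun d t => d.insert t (0:Int)) PySem.Dict.empty)
      (hkeys0.symm ▸ hnd) (fun u hu => hkeys0.symm ▸ hu)
    have hFkeys := houter.1.trans hkeys0
    have hFnd : (((PySem.Dict.ofList keywords).keys.foldl (fun d t =>
        ((PySem.Str.split₀ s).map (fun x => PySem.Str.lower x)).foldl (fun d word =>
          ((((PySem.Dict.ofList keywords)).getD t []).foldl (fun (st : PySem.Dict String Int × String) keyword =>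
            let word := PySem.Str.replace st.2 "," ""
            if strict then
              if keyword == word then (st.1.modify t 0 (· + 1), word) else (st.1, word)
            else
              if keyword == word then (st.1.modify t 0 (· + 10), word)
              else if PySem.Str.isIn keyword word then (st.1.modify t 0 (· + 1), word)
              else (st.1, word)) (d, word)).1) d)
        ((PySem.Dict.ofList keywords).keys.foldl (fun d t => d.insert t (0:Int)) PySem.Dict.empty)).keys).Nodup :=
      hFkeys.symm ▸ hnd
    have hFget : ∀ x ∈ (PySem.Dict.ofList keywords).keys,
        ((PySem.Dict.ofList keywords).keys.foldl (fun d t =>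
        ((PySem.Str.split₀ s).map (fun x => PySem.Str.lower x)).foldl (fun d word =>
          ((((PySem.Dict.ofList keywords)).getD t []).foldl (fun (st : PySem.Dict String Int × String) keyword =>
            let word := PySem.Str.replace st.2 "," ""
            if strict then
              if keyword == word then (st.1.modify t 0 (· + 1), word) else (st.1, word)
            else
              if keyword == word then (st.1.modify t 0 (· + 10), word)
              else if PySem.Str.isIn keyword word then (st.1.modify t 0 (· + 1), word)
              else (st.1, word)) (d, word)).1) d)
        ((PySem.Dict.ofList keywords).keys.foldl (fun d t => d.insert t (0:Int)) PySem.Dict.empty)).getD x 0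
        = pvSc strict ((PySem.Str.split₀ s).map (fun x => PySem.Str.lower x)) ((PySem.Dict.ofList keywords).getD x []) := by
      intro x hx
      rw [houter.2 x, hget0 x, zero_add, List.filter_beq, List.count_eq_one_of_mem hnd hx]
      simp
    have hFitems : (((PySem.Dict.ofList keywords).keys.foldl (fun d t =>
        ((PySem.Str.split₀ s).map (fun x => PySem.Str.lower x)).foldl (fun d word =>
          ((((PySem.Dict.ofList keywords)).getD t []).foldl (fun (st : PySem.Dict String Int × String) keyword =>
            let word := PySem.Str.replace st.2 "," ""
            if strict then
              if keyword == word then (st.1.modify t 0 (· + 1), word) else (st.1, word)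
            else
              if keyword == word then (st.1.modify t 0 (· + 10), word)
              else if PySem.Str.isIn keyword word then (st.1.modify t 0 (· + 1), word)
              else (st.1, word)) (d, word)).1) d)
        ((PySem.Dict.ofList keywords).keys.foldl (fun d t => d.insert t (0:Int)) PySem.Dict.empty))).items
        = (PySem.Dict.ofList keywords).keys.map (fun t =>
            (t, pvSc strict ((PySem.Str.split₀ s).map (fun x => PySem.Str.lower x)) ((PySem.Dict.ofList keywords).getD t []))) := by
      rw [PySem.Dict.items_eq_map_keys _ hFnd 0, hFkeys]
      exact List.map_congr_left (fun t ht => by rw [hFget t ht])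
    have hscored : ((PySem.Dict.ofList keywords).items.map (fun p => (p.1, cakCounter p.2))).map
          (fun p => (p.1, cakScore (if strict then 1 else 10)
            ((PySem.Str.split₀ s).map (fun raw =>
              (PySem.Str.replace (PySem.Str.lower raw) "," "",
               if strict then PySem.Set.empty else cakSubs (PySem.Str.replace (PySem.Str.lower raw) "," "")))) p.2))
        = (PySem.Dict.ofList keywords).keys.map (fun t =>
            (t, pvSc strict ((PySem.Str.split₀ s).map (fun x => PySem.Str.lower x)) ((PySem.Dict.ofList keywords).getD t []))) := by
      rw [List.map_map]
      conv_lhs => rw [PySem.Dict.items_eq_map_keys _ hnd [], List.map_map]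
      refine List.map_congr_left (fun t ht => ?_)
      show (t, cakScore _ _ (cakCounter ((PySem.Dict.ofList keywords).getD t []))) = _
      rw [cak_type strict (PySem.Str.split₀ s) ((PySem.Dict.ofList keywords).getD t [])]
    cases allow_many with
    | true =>
      rw [if_pos rfl, if_pos rfl, hFitems, hscored]
      exact congrArg some (pv_allow_eq _)
    | false =>
      have hne : keywords ≠ [] := by
        rcases hpre with h | h | h
        · exact absurd h (by simp)
        · exact absurd h (by simp)
        · exact h
      have hk : (PySem.Dict.ofList keywords).keys
          = PySem.Set.update ([] : List String) (keywords.map Prod.fst) :=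
        PySem.Dict.keys_foldl_insert_key keywords Prod.fst (fun _ p => p.2) PySem.Dict.empty
      rw [PySem.Set.update_nil_left] at hk
      have hkne : (PySem.Dict.ofList keywords).keys ≠ [] := by
        obtain ⟨q, rest, rfl⟩ := List.exists_cons_of_ne_nil hne
        intro h0'
        have hq : q.1 ∈ (PySem.Dict.ofList (q :: rest)).keys := by
          rw [hk]
          exact (PySem.Set.mem_ofList _ _).mpr (List.mem_map_of_mem (List.mem_cons_self ..))
        rw [h0'] at hq
        exact (List.not_mem_nil) hq
      have lne : (PySem.Dict.ofList keywords).keys.map (fun t =>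
          (t, pvSc strict ((PySem.Str.split₀ s).map (fun x => PySem.Str.lower x)) ((PySem.Dict.ofList keywords).getD t []))) ≠ [] := by
        simpa using hkne
      rw [if_neg (by simp), if_neg (by simp), hscored]
      exact pv_best_eq _ _ lne hFitems hFnd

-- ===== VERDICT (by name: the statement is the Claim_ definition above) =====
theorem check_against_keywords_py_spec : Claim_equal_check_against_keywords_py := by
  intro keywords str strict allow_many _hdom hpre
  unfold Spec_check_against_keywords_py
  exact pv_main keywords str strict allow_many hpre
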